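-- pv_equiv track=rewrite | github.com/eriakbar3/ai-smplhr | ai/recruiter.py | continue_from_user_input
-- ===== SOURCE A (Python) =====
-- from typing import List, Dict
--
-- def continue_from_user_input(pipeline: List[Dict], user_type: str) -> List[Dict]:
--     result = []
--     found = False
--     for step in pipeline:
--         if step['type'] == user_type:
--             found = True
--         if found:
--             result.append(step)
--     return result
-- ===== SOURCE B (Python) =====
-- def continue_from_user_input(pipeline, user_type):
--     idx = next((i for i, s in enumerate(pipeline) if s['type'] == user_type), None)
--     return pipeline[idx:] if idx is not None else []
-- ===== Notes on version B (the rewrite author's own statement) =====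
-- stated objective: simpler
-- what changed: Replaces A's found-flag accumulating loop with a find-first-matching-index-then-slice decomposition (B also stops scanning once the first match is found).
import Mathlib
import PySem

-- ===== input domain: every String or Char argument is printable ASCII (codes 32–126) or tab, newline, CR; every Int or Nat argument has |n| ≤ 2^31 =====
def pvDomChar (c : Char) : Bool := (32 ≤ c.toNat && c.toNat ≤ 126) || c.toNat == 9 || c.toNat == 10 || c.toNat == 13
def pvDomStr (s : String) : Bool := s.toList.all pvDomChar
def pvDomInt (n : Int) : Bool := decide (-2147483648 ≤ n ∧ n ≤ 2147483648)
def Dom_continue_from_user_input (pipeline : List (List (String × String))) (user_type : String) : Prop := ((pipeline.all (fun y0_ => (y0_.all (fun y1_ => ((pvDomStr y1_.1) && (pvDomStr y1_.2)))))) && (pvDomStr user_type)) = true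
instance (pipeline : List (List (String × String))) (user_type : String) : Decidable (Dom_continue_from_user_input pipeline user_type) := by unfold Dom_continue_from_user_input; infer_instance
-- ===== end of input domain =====

-- B replaces A's found-flag accumulating loop by find-the-first-matching-index-then-slice (simpler decomposition; return value only).

-- shared helper: step['type'] — first-match lookup in the association list (none = KeyError)
def pvGetType (step : List (String × String)) : Option String :=
  (step.find? (fun p => p.1 == "type")).map (·.2)

-- ===== PORT A =====
-- A's loop body: carry (result, found); under Pre_ every step has a "type" key, so getD "" is exact there.
def pvStepA (user_type : String) (st : List (List (String × String)) × Bool)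
    (step : List (String × String)) : List (List (String × String)) × Bool :=
  let found := if (pvGetType step).getD "" == user_type then true else st.2
  if found then (st.1 ++ [step], found) else (st.1, found)

def continue_from_user_input (pipeline : List (List (String × String))) (user_type : String) : List (List (String × String)) :=
  (pipeline.foldl (pvStepA user_type) ([], false)).1

-- ===== PORT B =====
def continue_from_user_input_alt (pipeline : List (List (String × String))) (user_type : String) : List (List (String × String)) :=
  match pipeline.findIdx? (fun s => (pvGetType s).getD "" == user_type) with
  | some i => pipeline.drop i
  | none => []

-- ===== PRECONDITION & SPEC =====
-- Pre_ excludes exactly the inputs on which A raises KeyError: some step has no "type" key.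
def Pre_continue_from_user_input (pipeline : List (List (String × String))) (user_type : String) : Prop :=
  ∀ step ∈ pipeline, (pvGetType step).isSome = true
instance (pipeline : List (List (String × String))) (user_type : String) : Decidable (Pre_continue_from_user_input pipeline user_type) := by unfold Pre_continue_from_user_input; infer_instance
def pvWitness_continue_from_user_input : (List (List (String × String))) × String := ([[("type", "a")], [("type", "b")]], "a")

def Spec_continue_from_user_input (pipeline : List (List (String × String))) (user_type : String) (out : List (List (String × String))) : Prop := out = continue_from_user_input_alt pipeline user_type
instance (pipeline : List (List (String × String))) (user_type : String) (out : List (List (String × String))) : Decidable (Spec_continue_from_user_input pipeline user_type out) := by unfold Spec_continue_from_user_input; infer_instance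

-- ===== CLAIM (what is proved, stated in full; the proofs are below) =====
def Claim_equal_continue_from_user_input : Prop := ∀ (pipeline : List (List (String × String))) (user_type : String), Dom_continue_from_user_input pipeline user_type → Pre_continue_from_user_input pipeline user_type → Spec_continue_from_user_input pipeline user_type (continue_from_user_input pipeline user_type)
-- ===== LEMMAS AND PROOFS =====

-- once found = true, A's loop appends every remaining step
lemma pvLoopTrue (user_type : String) (l : List (List (String × String)))
    (acc : List (List (String × String))) :
    (l.foldl (pvStepA user_type) (acc, true)).1 = acc ++ l := by
  induction l generalizing acc with
  | nil => simp
  | cons s t ih =>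
    rw [List.foldl_cons, show pvStepA user_type (acc, true) s = (acc ++ [s], true) by
      simp [pvStepA], ih]
    simp

-- while found = false, A's loop computes acc ++ (B's result on the remaining list)
lemma pvLoopFalse (user_type : String) (l : List (List (String × String)))
    (acc : List (List (String × String))) :
    (l.foldl (pvStepA user_type) (acc, false)).1 = acc ++ continue_from_user_input_alt l user_type := by
  induction l generalizing acc with
  | nil => simp [continue_from_user_input_alt]
  | cons s t ih =>
    by_cases h : ((pvGetType s).getD "" == user_type) = true
    · rw [List.foldl_cons, show pvStepA user_type (acc, false) s = (acc ++ [s], true) by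
        simp [pvStepA, h], pvLoopTrue]
      simp [continue_from_user_input_alt, List.findIdx?_cons, h]
    · rw [List.foldl_cons, show pvStepA user_type (acc, false) s = (acc, false) by
        simp [pvStepA, h], ih]
      simp only [continue_from_user_input_alt, List.findIdx?_cons, h,
        Bool.false_eq_true]
      cases hf : t.findIdx? (fun s => (pvGetType s).getD "" == user_type) <;> simp

-- ===== VERDICT (by name: the statement is the Claim_ definition above) =====
theorem continue_from_user_input_spec : Claim_equal_continue_from_user_input := by
  intro pipeline user_type _ _
  unfold Spec_continue_from_user_input continue_from_user_input
  simpa using pvLoopFalse user_type pipeline []
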